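-- pv_equiv track=rewrite | github.com/lehgtrung/two-are-better-than-one | asp_solver/asp_v2.py | split_entities_relations
-- ===== SOURCE A (Python) =====
-- def match_form(atom):
--     open_pos = atom.index('(')
--     if atom[:open_pos] in ['peop', 'loc', 'org', 'other']:
--         return 'entity'
--     return 'relation'
--
-- def split_entities_relations(atoms, weights):
--     entities = []
--     entity_weights = []
--     relations = []
--     relation_weights = []
--     for atom, weight in zip(atoms, weights):
--         if match_form(atom) == 'entity':
--             entities.append(atom)
--             entity_weights.append(weight)
--         else:
--             relations.append(atom)
--             relation_weights.append(weight)
--     return entities, entity_weights, relations, relation_weights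
-- ===== SOURCE B (Python) =====
-- def match_form(atom):
--     open_pos = atom.index('(')
--     if atom[:open_pos] in ['peop', 'loc', 'org', 'other']:
--         return 'entity'
--     return 'relation'
--
-- def split_entities_relations(atoms, weights):
--     # one ordered classification pass (any ValueError fires at the same atom as in A),
--     # then split the tagged triples into the four output lists
--     tagged = [(match_form(atom) == 'entity', atom, weight)
--               for atom, weight in zip(atoms, weights)]
--     entities = [a for e, a, _ in tagged if e]
--     entity_weights = [w for e, _, w in tagged if e]
--     relations = [a for e, a, _ in tagged if not e]
--     relation_weights = [w for e, _, w in tagged if not e]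
--     return entities, entity_weights, relations, relation_weights
-- ===== Notes on version B (the rewrite author's own statement) =====
-- stated objective: alternative
-- what changed: Replaces A's single branching loop with four append accumulators by one classification pass producing tagged (is_entity, atom, weight) triples, then four filter passes that split the tags into the output lists.
import Mathlib
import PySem

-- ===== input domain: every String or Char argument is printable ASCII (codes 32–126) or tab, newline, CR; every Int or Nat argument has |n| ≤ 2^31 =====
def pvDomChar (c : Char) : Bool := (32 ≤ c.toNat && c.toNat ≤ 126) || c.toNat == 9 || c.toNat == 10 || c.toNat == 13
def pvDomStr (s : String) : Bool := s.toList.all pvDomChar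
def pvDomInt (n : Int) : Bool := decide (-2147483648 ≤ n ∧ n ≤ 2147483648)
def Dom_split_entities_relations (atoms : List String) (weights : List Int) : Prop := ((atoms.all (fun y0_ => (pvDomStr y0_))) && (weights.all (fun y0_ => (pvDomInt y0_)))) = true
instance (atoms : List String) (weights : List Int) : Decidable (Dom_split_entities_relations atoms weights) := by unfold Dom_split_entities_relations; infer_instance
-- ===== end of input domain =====

-- ===== PORT A =====
-- B changes only the decomposition (classify-then-split instead of one branching loop); same cost, same values.
-- match_form: atom.index('(') raises ValueError when '(' is absent -> none here (excluded by Pre_).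
def match_form? (atom : String) : Option String :=
  let open_pos := PySem.Str.find atom "("
  if open_pos = -1 then none
  else if PySem.Str.slice atom none (some open_pos) ∈ ["peop", "loc", "org", "other"] then some "entity"
  else some "relation"

def split_entities_relations (atoms : List String) (weights : List Int) : List String × List Int × List String × List Int :=
  let acc := (atoms.zip weights).foldl
    (fun (st : List String × List Int × List String × List Int) p =>
      let (entities, entity_weights, relations, relation_weights) := st
      if match_form? p.1 = some "entity" then
        (entities ++ [p.1], entity_weights ++ [p.2], relations, relation_weights)
      else
        (entities, entity_weights, relations ++ [p.1], relation_weights ++ [p.2]))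
    ([], [], [], [])
  acc

-- ===== PORT B =====
def split_entities_relations_alt (atoms : List String) (weights : List Int) : List String × List Int × List String × List Int :=
  let tagged := (atoms.zip weights).map (fun p => (decide (match_form? p.1 = some "entity"), p.1, p.2))
  ((tagged.filter (fun t => t.1)).map (fun t => t.2.1),
   (tagged.filter (fun t => t.1)).map (fun t => t.2.2),
   (tagged.filter (fun t => !t.1)).map (fun t => t.2.1),
   (tagged.filter (fun t => !t.1)).map (fun t => t.2.2))

-- ===== PRECONDITION & SPEC =====
-- Pre_ excludes exactly the inputs where Python A raises ValueError: some zipped atom without '('.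
def Pre_split_entities_relations (atoms : List String) (weights : List Int) : Prop :=
  ∀ p ∈ atoms.zip weights, '(' ∈ p.1.toList
instance (atoms : List String) (weights : List Int) : Decidable (Pre_split_entities_relations atoms weights) := by
  unfold Pre_split_entities_relations; infer_instance
def pvWitness_split_entities_relations : List String × List Int := (["peop(a)", "live_in(a,b)"], [3, -1])
def Spec_split_entities_relations (atoms : List String) (weights : List Int) (out : List String × List Int × List String × List Int) : Prop := out = split_entities_relations_alt atoms weights
instance (atoms : List String) (weights : List Int) (out : List String × List Int × List String × List Int) : Decidable (Spec_split_entities_relations atoms weights out) := by unfold Spec_split_entities_relations; infer_instance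

-- ===== CLAIM (what is proved, stated in full; the proofs are below) =====
def Claim_equal_split_entities_relations : Prop := ∀ (atoms : List String) (weights : List Int), Dom_split_entities_relations atoms weights → Pre_split_entities_relations atoms weights → Spec_split_entities_relations atoms weights (split_entities_relations atoms weights)

-- ===== LEMMAS AND PROOFS =====
-- loop invariant: A's fold from any accumulators appends B's four filtered projections
theorem splitFold_eq (l : List (String × Int)) (e r : List String) (ew rw : List Int) :
    l.foldl
      (fun (st : List String × List Int × List String × List Int) p =>
        let (entities, entity_weights, relations, relation_weights) := st
        if match_form? p.1 = some "entity" then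
          (entities ++ [p.1], entity_weights ++ [p.2], relations, relation_weights)
        else
          (entities, entity_weights, relations ++ [p.1], relation_weights ++ [p.2]))
      (e, ew, r, rw)
    = (let tagged := l.map (fun p => (decide (match_form? p.1 = some "entity"), p.1, p.2))
       (e ++ (tagged.filter (fun t => t.1)).map (fun t => t.2.1),
        ew ++ (tagged.filter (fun t => t.1)).map (fun t => t.2.2),
        r ++ (tagged.filter (fun t => !t.1)).map (fun t => t.2.1),
        rw ++ (tagged.filter (fun t => !t.1)).map (fun t => t.2.2))) := by
  induction l generalizing e ew r rw with
  | nil => simp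
  | cons p t ih =>
    by_cases h : match_form? p.1 = some "entity" <;>
      simp [List.foldl_cons, h, ih, List.append_assoc]

-- ===== VERDICT (by name: the statement is the Claim_ definition above) =====
theorem split_entities_relations_spec : Claim_equal_split_entities_relations := by
  intro atoms weights _ _
  unfold Spec_split_entities_relations split_entities_relations split_entities_relations_alt
  simp [splitFold_eq]
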